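-- pv_equiv track=rewrite | github.com/thetangstr/findmycar | findmycar/attribute_standardizer.py | _standardize_body_style
-- ===== SOURCE A (Python) =====
-- from typing import Dict, List, Any, Optional
--
-- def _standardize_body_style(body: Optional[str]) -> Optional[str]:
--     """Standardize body styles"""
--     if not body:
--         return None
--
--     body_lower = body.lower()
--
--     if any(term in body_lower for term in ['sedan', 'saloon']):
--         return 'sedan'
--     elif any(term in body_lower for term in ['suv', 'sport utility', 'crossover']):
--         return 'suv'
--     elif any(term in body_lower for term in ['truck', 'pickup']):
--         return 'truck'
--     elif any(term in body_lower for term in ['coupe', '2 door', '2-door']):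
--         return 'coupe'
--     elif any(term in body_lower for term in ['convertible', 'cabriolet', 'roadster']):
--         return 'convertible'
--     elif any(term in body_lower for term in ['hatchback', 'hatch']):
--         return 'hatchback'
--     elif any(term in body_lower for term in ['wagon', 'estate']):
--         return 'wagon'
--     elif any(term in body_lower for term in ['van', 'minivan']):
--         return 'van'
--
--     return body
-- ===== SOURCE B (Python) =====
-- from typing import Optional
--
-- # Flat keyword dictionary: term -> priority (index of its standardized category).
-- _TERM_PRIORITY = {
--     'sedan': 0, 'saloon': 0,
--     'suv': 1, 'sport utility': 1, 'crossover': 1,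
--     'truck': 2, 'pickup': 2,
--     'coupe': 3, '2 door': 3, '2-door': 3,
--     'convertible': 4, 'cabriolet': 4, 'roadster': 4,
--     'hatchback': 5, 'hatch': 5,
--     'wagon': 6, 'estate': 6,
--     'van': 7, 'minivan': 7,
-- }
-- _CATEGORIES = ['sedan', 'suv', 'truck', 'coupe', 'convertible',
--                'hatchback', 'wagon', 'van']
-- _TERM_LENGTHS = [3, 5, 6, 7, 8, 9, 11, 13]  # distinct term lengths
--
--
-- def _standardize_body_style(body: Optional[str]) -> Optional[str]:
--     # Sliding-window scan: hash every window of a term length and keep the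
--     # minimal priority seen; no per-category substring searches.
--     if not body:
--         return None
--     body_lower = body.lower()
--     best = 8
--     for i in range(len(body_lower)):
--         for length in _TERM_LENGTHS:
--             p = _TERM_PRIORITY.get(body_lower[i:i + length])
--             if p is not None and p < best:
--                 best = p
--     return _CATEGORIES[best] if best < 8 else body
-- ===== Notes on version B (the rewrite author's own statement) =====
-- stated objective: alternative
-- what changed: Replaced the per-category substring searches ('term in body_lower' chain) by a sliding-window scan: every window of a term length is looked up in a flat term-to-priority hash map and the minimal priority seen wins; no category branching, no substring search primitives.
import Mathlib
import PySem

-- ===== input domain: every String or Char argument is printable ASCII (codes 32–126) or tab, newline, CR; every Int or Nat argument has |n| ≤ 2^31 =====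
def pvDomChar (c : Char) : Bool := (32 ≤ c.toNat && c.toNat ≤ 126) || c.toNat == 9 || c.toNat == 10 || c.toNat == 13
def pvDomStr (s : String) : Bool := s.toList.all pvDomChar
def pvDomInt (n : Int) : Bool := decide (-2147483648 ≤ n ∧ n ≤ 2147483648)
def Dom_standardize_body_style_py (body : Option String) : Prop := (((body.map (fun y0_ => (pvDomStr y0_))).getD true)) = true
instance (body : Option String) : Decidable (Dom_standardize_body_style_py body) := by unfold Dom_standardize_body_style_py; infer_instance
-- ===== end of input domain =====

-- B replaces A's chain of per-category substring searches by a sliding-window scan: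
-- every window of a term length is looked up in a flat term→priority dict and the
-- minimal priority seen wins (alternative algorithm; same behaviour).

-- ===== PORT A =====
def standardize_body_style_py (body : Option String) : Option String :=
  match body with
  | none => none
  | some b =>
    if b = "" then none
    else
      let bl := PySem.Str.lower b
      if ["sedan", "saloon"].any (fun t => PySem.Str.isIn t bl) then some "sedan"
      else if ["suv", "sport utility", "crossover"].any (fun t => PySem.Str.isIn t bl) then some "suv"
      else if ["truck", "pickup"].any (fun t => PySem.Str.isIn t bl) then some "truck"
      else if ["coupe", "2 door", "2-door"].any (fun t => PySem.Str.isIn t bl) then some "coupe"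
      else if ["convertible", "cabriolet", "roadster"].any (fun t => PySem.Str.isIn t bl) then some "convertible"
      else if ["hatchback", "hatch"].any (fun t => PySem.Str.isIn t bl) then some "hatchback"
      else if ["wagon", "estate"].any (fun t => PySem.Str.isIn t bl) then some "wagon"
      else if ["van", "minivan"].any (fun t => PySem.Str.isIn t bl) then some "van"
      else some b

-- ===== PORT B =====
def pvTermsDict : PySem.Dict String Int := PySem.Dict.ofList
  [("sedan", 0), ("saloon", 0),
   ("suv", 1), ("sport utility", 1), ("crossover", 1),
   ("truck", 2), ("pickup", 2),
   ("coupe", 3), ("2 door", 3), ("2-door", 3),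
   ("convertible", 4), ("cabriolet", 4), ("roadster", 4),
   ("hatchback", 5), ("hatch", 5),
   ("wagon", 6), ("estate", 6),
   ("van", 7), ("minivan", 7)]

def pvCats : List String :=
  ["sedan", "suv", "truck", "coupe", "convertible", "hatchback", "wagon", "van"]

def pvLens : List Int := [3, 5, 6, 7, 8, 9, 11, 13]

def standardize_body_style_py_alt (body : Option String) : Option String :=
  match body with
  | none => none
  | some b =>
    if b = "" then none
    else
      let bl := PySem.Str.lower b
      let best := (PySem.List.pyRange 0 (PySem.Str.len bl) 1).foldl (fun best i =>
        pvLens.foldl (fun best L =>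
          match PySem.Dict.get? pvTermsDict (PySem.Str.slice bl (some i) (some (i + L))) with
          | some p => if p < best then p else best
          | none => best) best) 8
      if best < 8 then some (PySem.List.pyGetD pvCats best "") else some b

-- ===== PRECONDITION & SPEC =====
def Spec_standardize_body_style_py (body : Option String) (out : Option String) : Prop := out = standardize_body_style_py_alt body
instance (body : Option String) (out : Option String) : Decidable (Spec_standardize_body_style_py body out) := by unfold Spec_standardize_body_style_py; infer_instance

-- ===== CLAIM (what is proved, stated in full; the proofs are below) =====
def Claim_equal_standardize_body_style_py : Prop := ∀ (body : Option String), Dom_standardize_body_style_py body → Spec_standardize_body_style_py body (standardize_body_style_py body)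

-- ===== LEMMAS AND PROOFS =====

-- proof-side abbreviations
def pvF (bl : String) (x : Int × Int) : Option Int :=
  PySem.Dict.get? pvTermsDict (PySem.Str.slice bl (some x.1) (some (x.1 + x.2)))

def pvP (n : Int) : List (Int × Int) :=
  (PySem.List.pyRange 0 n 1).flatMap (fun i => pvLens.map (fun L => (i, L)))

-- "some term with priority p occurs as a substring of l"
def pvHit (l : List Char) (p : Int) : Prop :=
  ∃ t : String, PySem.Dict.get? pvTermsDict t = some p ∧ t.toList <:+: l

-- nested loop = fold over the pair list
theorem pv_foldl_nested {α β γ : Type} (xs : List α) (ys : List β) (g : γ → α × β → γ) (b0 : γ) :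
    xs.foldl (fun b i => ys.foldl (fun b j => g b (i, j)) b) b0
      = (xs.flatMap (fun i => ys.map (fun j => (i, j)))).foldl g b0 := by
  induction xs generalizing b0 with
  | nil => rfl
  | cons x xs ih => simp [List.foldl_append, List.foldl_map, ih]

theorem pv_nested_eq (bl : String) :
    ((PySem.List.pyRange 0 (PySem.Str.len bl) 1).foldl (fun best i =>
        pvLens.foldl (fun best L =>
          match PySem.Dict.get? pvTermsDict (PySem.Str.slice bl (some i) (some (i + L))) with
          | some p => if p < best then p else best
          | none => best) best) 8)
      = (pvP (PySem.Str.len bl)).foldl (fun b x =>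
          match pvF bl x with
          | some p => if p < b then p else b
          | none => b) 8 := by
  simpa [pvF] using pv_foldl_nested (PySem.List.pyRange 0 (PySem.Str.len bl) 1) pvLens
    (fun b x => match pvF bl x with | some p => if p < b then p else b | none => b) 8

-- generic running-minimum fold facts
theorem pv_minfold_le {α : Type} (f : α → Option Int) (xs : List α) (b0 : Int) :
    xs.foldl (fun b x => match f x with | some p => if p < b then p else b | none => b) b0 ≤ b0 := by
  induction xs generalizing b0 with
  | nil => simp
  | cons x xs ih =>
    refine le_trans (ih _) ?_
    cases h : f x <;> simp [h]
    split <;> omega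

theorem pv_minfold_cases {α : Type} (f : α → Option Int) (xs : List α) (b0 : Int) :
    xs.foldl (fun b x => match f x with | some p => if p < b then p else b | none => b) b0 = b0
      ∨ ∃ x ∈ xs, f x = some (xs.foldl (fun b x => match f x with | some p => if p < b then p else b | none => b) b0) := by
  induction xs generalizing b0 with
  | nil => left; rfl
  | cons x xs ih =>
    rcases ih (match f x with | some p => if p < b0 then p else b0 | none => b0) with h | ⟨y, hy, hfy⟩
    · rw [List.foldl_cons, h]
      cases hfx : f x with
      | none => left; simp
      | some p =>
        by_cases hp : p < b0
        · right; exact ⟨x, by simp, by simp [hfx, hp]⟩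
        · left; simp [hp]
    · right; exact ⟨y, by simp [hy], hfy⟩

theorem pv_minfold_min {α : Type} (f : α → Option Int) (xs : List α) (b0 : Int) :
    ∀ x ∈ xs, ∀ p, f x = some p →
      xs.foldl (fun b x => match f x with | some p => if p < b then p else b | none => b) b0 ≤ p := by
  induction xs generalizing b0 with
  | nil => intro x hx; exact absurd hx (by simp)
  | cons y ys ih =>
    intro x hx p hfx
    rcases List.mem_cons.mp hx with rfl | hx'
    · refine le_trans (pv_minfold_le f ys _) ?_
      simp [hfx]; split <;> omega
    · exact ih _ x hx' p hfx

-- a successful lookup means membership in the literal dict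
theorem pv_get_mem {t : String} {p : Int} (h : PySem.Dict.get? pvTermsDict t = some p) :
    (t, p) ∈ pvTermsDict.items := by
  unfold PySem.Dict.get? at h
  rcases Option.map_eq_some_iff.mp h with ⟨⟨k, v⟩, hf, hv⟩
  have hk := List.find?_some hf
  have hm := List.mem_of_find?_eq_some hf
  simp only [beq_iff_eq] at hk
  subst hk; subst hv; exact hm

theorem pv_term_facts {t : String} {p : Int} (h : PySem.Dict.get? pvTermsDict t = some p) :
    ((t.toList.length : Int) ∈ pvLens ∧ t ≠ "" ∧ 0 ≤ p ∧ p < 8) := by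
  have hm := pv_get_mem h
  have : ∀ x ∈ pvTermsDict.items,
      ((x.1.toList.length : Int) ∈ pvLens ∧ x.1 ≠ "" ∧ 0 ≤ x.2 ∧ x.2 < 8) := by decide
  exact this (t, p) hm

theorem pv_hit_bounds {l : List Char} {p : Int} (h : pvHit l p) : 0 ≤ p ∧ p < 8 := by
  obtain ⟨t, hg, -⟩ := h
  exact (pv_term_facts hg).2.2

-- forward: any dict hit on a window is a real occurrence
theorem pv_slice_infix (bl : String) (i L : Int) (hi : 0 ≤ i) (hL : 0 ≤ L) :
    (PySem.Str.slice bl (some i) (some (i + L))).toList <:+: bl.toList := by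
  rw [PySem.Str.toList_slice, PySem.Chars.slice_eq_listSlice, PySem.List.slice_toNat bl.toList hi (by omega)]
  exact ((List.take_prefix _ _).isInfix).trans ((List.drop_suffix _ _).isInfix)

theorem pv_hit_of_pair {bl : String} {n : Int} {x : Int × Int} {p : Int}
    (hx : x ∈ pvP n) (hf : pvF bl x = some p) : pvHit bl.toList p := by
  obtain ⟨i, ⟨hi0, -⟩, L, hL, rfl⟩ : ∃ i, (0 ≤ i ∧ i < n) ∧ ∃ L ∈ pvLens, (i, L) = x := by
    simpa [pvP, List.mem_flatMap, List.mem_map, PySem.List.mem_pyRange_one] using hx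
  have hL0 : 0 ≤ L := by
    simp [pvLens] at hL
    rcases hL with h | h | h | h | h | h | h | h <;> omega
  exact ⟨_, hf, pv_slice_infix bl i L hi0 hL0⟩

-- backward: a real occurrence is found by some window
theorem pv_pair_of_hit {bl : String} {p : Int} (h : pvHit bl.toList p) :
    ∃ x ∈ pvP (PySem.Str.len bl), pvF bl x = some p := by
  obtain ⟨t, hg, hinf⟩ := h
  obtain ⟨hlen, hne, -, -⟩ := pv_term_facts hg
  have htne : t.toList ≠ [] := by
    intro hnil
    exact hne (String.toList_inj.mp (by simpa using hnil))
  obtain ⟨j, hpre⟩ : ∃ j, t.toList <+: bl.toList.drop j :=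
    (PySem.Chars.exists_prefix_drop_iff_isIn t.toList bl.toList).mpr
      ((PySem.Chars.isIn_iff_infix _ _).mpr hinf)
  have hj : j < bl.toList.length := by
    by_contra hge
    have hd : bl.toList.drop j = [] := List.drop_eq_nil_iff.mpr (by omega)
    rw [hd] at hpre
    exact htne (List.prefix_nil.mp hpre)
  refine ⟨((j : Int), (t.toList.length : Int)), ?_, ?_⟩
  · simp only [pvP, List.mem_flatMap, List.mem_map]
    refine ⟨(j : Int), PySem.List.mem_pyRange_one.mpr ⟨by omega, ?_⟩,
      (t.toList.length : Int), hlen, rfl⟩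
    rw [PySem.Str.len_eq]; exact_mod_cast hj
  · have hs : PySem.Str.slice bl (some (j : Int)) (some ((j : Int) + (t.toList.length : Int))) = t := by
      apply String.toList_inj.mp
      rw [PySem.Str.toList_slice, PySem.Chars.slice_eq_listSlice, PySem.List.slice_natCast_add]
      exact (List.prefix_iff_eq_take.mp hpre).symm
    have hrfl : pvF bl ((j : Int), (t.toList.length : Int))
        = PySem.Dict.get? pvTermsDict
            (PySem.Str.slice bl (some (j : Int)) (some ((j : Int) + (t.toList.length : Int)))) := rfl
    rw [hrfl, hs]; exact hg

-- each chain test of A is exactly "pvHit at that priority"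
theorem pv_any_iff (bl : String) (terms : List String) (k : Int)
    (hfwd : ∀ t ∈ terms, PySem.Dict.get? pvTermsDict t = some k)
    (hbwd : ∀ x ∈ pvTermsDict.items, x.2 = k → x.1 ∈ terms) :
    (terms.any (fun t => PySem.Str.isIn t bl)) = true ↔ pvHit bl.toList k := by
  rw [List.any_eq_true]
  constructor
  · rintro ⟨t, ht, hin⟩
    exact ⟨t, hfwd t ht, (PySem.Str.isIn_iff_infix t bl).mp hin⟩
  · rintro ⟨t, hg, hinf⟩
    exact ⟨t, hbwd (t, k) (pv_get_mem hg) rfl, (PySem.Str.isIn_iff_infix t bl).mpr hinf⟩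

-- the core equivalence, for the lowered string
theorem pv_core (bl b : String) :
    (if ["sedan", "saloon"].any (fun t => PySem.Str.isIn t bl) then some "sedan"
      else if ["suv", "sport utility", "crossover"].any (fun t => PySem.Str.isIn t bl) then some "suv"
      else if ["truck", "pickup"].any (fun t => PySem.Str.isIn t bl) then some "truck"
      else if ["coupe", "2 door", "2-door"].any (fun t => PySem.Str.isIn t bl) then some "coupe"
      else if ["convertible", "cabriolet", "roadster"].any (fun t => PySem.Str.isIn t bl) then some "convertible"
      else if ["hatchback", "hatch"].any (fun t => PySem.Str.isIn t bl) then some "hatchback"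
      else if ["wagon", "estate"].any (fun t => PySem.Str.isIn t bl) then some "wagon"
      else if ["van", "minivan"].any (fun t => PySem.Str.isIn t bl) then some "van"
      else some b)
    = (let best := (PySem.List.pyRange 0 (PySem.Str.len bl) 1).foldl (fun best i =>
          pvLens.foldl (fun best L =>
            match PySem.Dict.get? pvTermsDict (PySem.Str.slice bl (some i) (some (i + L))) with
            | some p => if p < best then p else best
            | none => best) best) 8
        if best < 8 then some (PySem.List.pyGetD pvCats best "") else some b) := by
  rw [pv_nested_eq bl]
  set best := (pvP (PySem.Str.len bl)).foldl (fun b x =>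
      match pvF bl x with | some p => if p < b then p else b | none => b) 8 with hbest
  have hle : best ≤ 8 := pv_minfold_le (pvF bl) _ 8
  have hmin : ∀ p, pvHit bl.toList p → best ≤ p := by
    intro p hp
    obtain ⟨x, hx, hf⟩ := pv_pair_of_hit hp
    exact pv_minfold_min (pvF bl) _ 8 x hx p hf
  have hhit : best < 8 → pvHit bl.toList best := by
    intro hlt
    rcases pv_minfold_cases (pvF bl) (pvP (PySem.Str.len bl)) 8 with h | ⟨x, hx, hf⟩
    · omega
    · exact pv_hit_of_pair hx hf
  have h0 := pv_any_iff bl ["sedan", "saloon"] 0 (by decide) (by decide)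
  have h1 := pv_any_iff bl ["suv", "sport utility", "crossover"] 1 (by decide) (by decide)
  have h2 := pv_any_iff bl ["truck", "pickup"] 2 (by decide) (by decide)
  have h3 := pv_any_iff bl ["coupe", "2 door", "2-door"] 3 (by decide) (by decide)
  have h4 := pv_any_iff bl ["convertible", "cabriolet", "roadster"] 4 (by decide) (by decide)
  have h5 := pv_any_iff bl ["hatchback", "hatch"] 5 (by decide) (by decide)
  have h6 := pv_any_iff bl ["wagon", "estate"] 6 (by decide) (by decide)
  have h7 := pv_any_iff bl ["van", "minivan"] 7 (by decide) (by decide)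
  by_cases hb : best < 8
  · obtain ⟨hb0, hb8⟩ := pv_hit_bounds (hhit hb)
    have hnotlt : ∀ q, q < best → ¬ pvHit bl.toList q := fun q hq hqh => by
      have := hmin q hqh; omega
    clear hbest
    interval_cases best
    · rw [if_pos (h0.mpr (hhit (by omega))), if_pos (by decide)]; rfl
    · rw [if_neg (fun hc => hnotlt 0 (by omega) (h0.mp hc)),
        if_pos (h1.mpr (hhit (by omega))), if_pos (by decide)]; rfl
    · rw [if_neg (fun hc => hnotlt 0 (by omega) (h0.mp hc)),
        if_neg (fun hc => hnotlt 1 (by omega) (h1.mp hc)),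
        if_pos (h2.mpr (hhit (by omega))), if_pos (by decide)]; rfl
    · rw [if_neg (fun hc => hnotlt 0 (by omega) (h0.mp hc)),
        if_neg (fun hc => hnotlt 1 (by omega) (h1.mp hc)),
        if_neg (fun hc => hnotlt 2 (by omega) (h2.mp hc)),
        if_pos (h3.mpr (hhit (by omega))), if_pos (by decide)]; rfl
    · rw [if_neg (fun hc => hnotlt 0 (by omega) (h0.mp hc)),
        if_neg (fun hc => hnotlt 1 (by omega) (h1.mp hc)),
        if_neg (fun hc => hnotlt 2 (by omega) (h2.mp hc)),
        if_neg (fun hc => hnotlt 3 (by omega) (h3.mp hc)),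
        if_pos (h4.mpr (hhit (by omega))), if_pos (by decide)]; rfl
    · rw [if_neg (fun hc => hnotlt 0 (by omega) (h0.mp hc)),
        if_neg (fun hc => hnotlt 1 (by omega) (h1.mp hc)),
        if_neg (fun hc => hnotlt 2 (by omega) (h2.mp hc)),
        if_neg (fun hc => hnotlt 3 (by omega) (h3.mp hc)),
        if_neg (fun hc => hnotlt 4 (by omega) (h4.mp hc)),
        if_pos (h5.mpr (hhit (by omega))), if_pos (by decide)]; rfl
    · rw [if_neg (fun hc => hnotlt 0 (by omega) (h0.mp hc)),
        if_neg (fun hc => hnotlt 1 (by omega) (h1.mp hc)),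
        if_neg (fun hc => hnotlt 2 (by omega) (h2.mp hc)),
        if_neg (fun hc => hnotlt 3 (by omega) (h3.mp hc)),
        if_neg (fun hc => hnotlt 4 (by omega) (h4.mp hc)),
        if_neg (fun hc => hnotlt 5 (by omega) (h5.mp hc)),
        if_pos (h6.mpr (hhit (by omega))), if_pos (by decide)]; rfl
    · rw [if_neg (fun hc => hnotlt 0 (by omega) (h0.mp hc)),
        if_neg (fun hc => hnotlt 1 (by omega) (h1.mp hc)),
        if_neg (fun hc => hnotlt 2 (by omega) (h2.mp hc)),
        if_neg (fun hc => hnotlt 3 (by omega) (h3.mp hc)),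
        if_neg (fun hc => hnotlt 4 (by omega) (h4.mp hc)),
        if_neg (fun hc => hnotlt 5 (by omega) (h5.mp hc)),
        if_neg (fun hc => hnotlt 6 (by omega) (h6.mp hc)),
        if_pos (h7.mpr (hhit (by omega))), if_pos (by decide)]; rfl
  · have hno : ∀ p, ¬ pvHit bl.toList p := by
      intro p hp
      have h1p := pv_hit_bounds hp
      have h2p := hmin p hp
      omega
    rw [if_neg (fun hc => hno 0 (h0.mp hc)),
      if_neg (fun hc => hno 1 (h1.mp hc)),
      if_neg (fun hc => hno 2 (h2.mp hc)),
      if_neg (fun hc => hno 3 (h3.mp hc)),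
      if_neg (fun hc => hno 4 (h4.mp hc)),
      if_neg (fun hc => hno 5 (h5.mp hc)),
      if_neg (fun hc => hno 6 (h6.mp hc)),
      if_neg (fun hc => hno 7 (h7.mp hc)),
      if_neg hb]

-- ===== VERDICT (by name: the statement is the Claim_ definition above) =====
theorem standardize_body_style_py_spec : Claim_equal_standardize_body_style_py := by
  intro body _
  unfold Spec_standardize_body_style_py standardize_body_style_py standardize_body_style_py_alt
  cases body with
  | none => rfl
  | some b =>
    by_cases hb : b = ""
    · simp [hb]
    · simp only [if_neg hb]
      exact pv_core (PySem.Str.lower b) b
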